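-- pv_equiv track=rewrite | github.com/spbgithub/projecteuler | subset.py | subset_n
-- ===== SOURCE A (Python) =====
-- def subset_n(l, n, prefix):
-- 	if n == 0:
-- 		return [sorted(prefix)]
-- 	elif n > len(l):
-- 		return subset_n(l, n-1, prefix)
-- 	elif n == len(l):
-- 		return subset_n(l[1:], n-1, prefix + [l[0]])
-- 	else:
-- 		return subset_n(l[1:], n - 1, prefix + [l[0]]) + subset_n(l[1:], n, prefix)
-- ===== SOURCE B (Python) =====
-- def subset_n(l, n, prefix):
--     # Iterative DP over the suffixes of l: table[j] holds the size-j
--     # combinations (in lexicographic index order) of the suffix processed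
--     # so far; one right-to-left pass replaces the branching recursion.
--     k = min(n, len(l))
--     table = [[[]]] + [[] for _ in range(k)]
--     for x in reversed(l):
--         for j in range(k, 0, -1):
--             table[j] = [[x] + c for c in table[j-1]] + table[j]
--     return [sorted(prefix + c) for c in table[k]]
-- ===== Notes on version B (the rewrite author's own statement) =====
-- stated objective: alternative
-- what changed: Replaces the four-way branching include/exclude recursion by an iterative dynamic-programming table over suffixes of l (table[j] = size-j combinations of the suffix seen so far), built in one right-to-left pass; n > len(l) is handled by the min clamp instead of a decrementing recursion.
import Mathlib
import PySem

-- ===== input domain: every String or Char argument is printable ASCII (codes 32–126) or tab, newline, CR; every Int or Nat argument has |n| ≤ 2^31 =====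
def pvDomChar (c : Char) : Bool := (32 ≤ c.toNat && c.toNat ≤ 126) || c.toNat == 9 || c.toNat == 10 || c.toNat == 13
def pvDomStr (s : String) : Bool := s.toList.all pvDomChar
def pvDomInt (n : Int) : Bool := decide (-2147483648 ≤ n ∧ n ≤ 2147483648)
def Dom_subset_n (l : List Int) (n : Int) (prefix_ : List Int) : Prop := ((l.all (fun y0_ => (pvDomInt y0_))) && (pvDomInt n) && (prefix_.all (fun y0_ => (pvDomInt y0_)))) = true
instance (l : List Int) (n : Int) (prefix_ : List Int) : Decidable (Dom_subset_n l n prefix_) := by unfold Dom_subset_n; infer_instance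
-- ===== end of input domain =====

-- B replaces A's branching include/exclude recursion by an iterative DP table over suffixes of l (objective: alternative, same cost).

-- ===== PORT A =====
-- literal transliteration of A's recursion; the [] match arms stand for Python's
-- IndexError on l[0] (reachable only for n < 0, which Pre_ excludes)
def subset_n (l : List Int) (n : Int) (prefix_ : List Int) : List (List Int) :=
  if n = 0 then
    [PySem.List.sorted prefix_ (fun c => c) false]
  else if n > l.length then
    subset_n l (n - 1) prefix_
  else if n = l.length then
    match l with
    | [] => []
    | x :: xs => subset_n xs (n - 1) (prefix_ ++ [x])
  else
    match l with
    | [] => []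
    | x :: xs => subset_n xs (n - 1) (prefix_ ++ [x]) ++ subset_n xs n prefix_
termination_by n.toNat + l.length
decreasing_by all_goals (simp <;> omega)

-- ===== PORT B =====
-- inner loop 'for j in range(k,0,-1): table[j] = [[x]+c for c in table[j-1]] + table[j]':
-- each entry is rebuilt from its (old) predecessor and itself
def pvPush (x : Int) (prev : List (List Int)) : List (List (List Int)) → List (List (List Int))
  | [] => []
  | cur :: rest => (prev.map (fun c => x :: c) ++ cur) :: pvPush x cur rest

-- one step of the outer 'for x in reversed(l)' loop: entry 0 is untouched
def pvStep (x : Int) (table : List (List (List Int))) : List (List (List Int)) :=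
  match table with
  | [] => []
  | t0 :: rest => t0 :: pvPush x t0 rest

def subset_n_alt (l : List Int) (n : Int) (prefix_ : List Int) : List (List Int) :=
  let k : Nat := (min n (l.length : Int)).toNat
  let table₀ : List (List (List Int)) := [[[]]] ++ List.replicate k []
  let table := l.foldr pvStep table₀
  (table.getD k []).map (fun c => PySem.List.sorted (prefix_ ++ c) (fun c => c) false)

-- ===== PRECONDITION & SPEC =====
-- Pre_ excludes n < 0, on which the Python A always raises (IndexError on l[0]
-- after the list has been consumed); it admits every input on which A returns.
def Pre_subset_n (l : List Int) (n : Int) (prefix_ : List Int) : Prop := 0 ≤ n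
instance (l : List Int) (n : Int) (prefix_ : List Int) : Decidable (Pre_subset_n l n prefix_) := by unfold Pre_subset_n; infer_instance
def pvWitness_subset_n : List Int × Int × List Int := ([3, 1, 2], 2, [7])

def Spec_subset_n (l : List Int) (n : Int) (prefix_ : List Int) (out : List (List Int)) : Prop := out = subset_n_alt l n prefix_
instance (l : List Int) (n : Int) (prefix_ : List Int) (out : List (List Int)) : Decidable (Spec_subset_n l n prefix_ out) := by unfold Spec_subset_n; infer_instance

-- ===== CLAIM (what is proved, stated in full; the proofs are below) =====
def Claim_equal_subset_n : Prop := ∀ (l : List Int) (n : Int) (prefix_ : List Int), Dom_subset_n l n prefix_ → Pre_subset_n l n prefix_ → Spec_subset_n l n prefix_ (subset_n l n prefix_)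

-- ===== LEMMAS AND PROOFS =====

-- the common mathematical object: size-k combinations of l, in lexicographic index order
def pvComb (l : List Int) (k : Nat) : List (List Int) :=
  match l, k with
  | _, 0 => [[]]
  | [], _ + 1 => []
  | x :: xs, j + 1 => (pvComb xs j).map (fun c => x :: c) ++ pvComb xs (j + 1)

theorem pvComb_nil_eq (k : Nat) (hk : 0 < k) : pvComb [] k = [] := by
  cases k with
  | zero => omega
  | succ j => rfl

theorem pvComb_gt (l : List Int) (k : Nat) (h : l.length < k) : pvComb l k = [] := by
  induction l generalizing k with
  | nil => exact pvComb_nil_eq k (by omega)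
  | cons x xs ih =>
    cases k with
    | zero => simp at h
    | succ j =>
      simp only [pvComb]
      rw [ih j (by simp at h; omega), ih (j+1) (by simp at h; omega)]
      simp

-- characterisation of A
theorem subset_n_eq_comb (l : List Int) (n : Int) (prefix_ : List Int) :
    0 ≤ n → subset_n l n prefix_ =
      (pvComb l (min n.toNat l.length)).map
        (fun c => PySem.List.sorted (prefix_ ++ c) (fun c => c) false) := by
  induction l, n, prefix_ using subset_n.induct with
  | case1 l prefix_ =>
    intro _
    rw [subset_n.eq_def]
    simp [pvComb]
  | case2 l n prefix_ h1 h2 ih =>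
    intro hn
    rw [subset_n.eq_def]
    simp only [if_neg h1, if_pos h2]
    rw [ih (by omega)]
    have : min (n - 1).toNat l.length = min n.toNat l.length := by omega
    rw [this]
  | case3 prefix_ h1 h2 =>
    intro _
    simp at h1
  | case4 prefix_ x xs h1 h2 ih =>
    intro _
    rw [subset_n.eq_def]
    simp only [if_neg h1, if_neg h2, if_pos trivial]
    have hlen : ((((x :: xs).length : Int)) - 1) = (xs.length : Int) := by simp
    rw [hlen] at ih ⊢
    rw [ih (by positivity)]
    have e1 : min (xs.length : Int).toNat xs.length = xs.length := by simp
    have e2 : min ((((x :: xs).length : Int))).toNat (x :: xs).length = xs.length + 1 := by simp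
    rw [e1, e2]
    simp only [pvComb]
    rw [pvComb_gt xs (xs.length + 1) (by omega)]
    simp [Function.comp, List.append_assoc]
  | case5 n prefix_ h1 h2 h3 =>
    intro hn
    exfalso
    simp at h2 h3
    omega
  | case6 n prefix_ h1 x xs h2 h3 ih1 ih2 =>
    intro hn
    rw [subset_n.eq_def]
    simp only [if_neg h1, if_neg h2, if_neg h3]
    rw [ih1 (by simp at h2; omega), ih2 hn]
    have hlt : n < (xs.length : Int) + 1 := by
      simp at h2 h3
      omega
    have hne : n ≠ 0 := h1
    have e1 : min (n - 1).toNat xs.length = n.toNat - 1 := by omega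
    have e2 : min n.toNat xs.length = n.toNat := by simp at h2; omega
    have e3 : min n.toNat (x :: xs).length = n.toNat := by simp; omega
    rw [e1, e2, e3]
    have hpos : n.toNat = (n.toNat - 1) + 1 := by omega
    rw [hpos]
    simp only [pvComb]
    rw [← hpos]
    simp [Function.comp, List.append_assoc]

-- [g j, g (j+1), …, g (j+m-1)]
def pvTab (g : Nat → List (List Int)) (j m : Nat) : List (List (List Int)) :=
  match m with
  | 0 => []
  | m + 1 => g j :: pvTab g (j + 1) m

theorem pvPush_tab (x : Int) (g : Nat → List (List Int)) :
    ∀ (m j : Nat) (prev : List (List Int)), prev = g j →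
      pvPush x prev (pvTab g (j + 1) m) =
        pvTab (fun i => (g (i - 1)).map (fun c => x :: c) ++ g i) (j + 1) m := by
  intro m
  induction m with
  | zero => intro j prev _; rfl
  | succ m ih =>
    intro j prev hp
    simp only [pvTab, pvPush, hp]
    congr 1
    exact ih (j + 1) (g (j + 1)) rfl

theorem pvStep_tab (x : Int) (l : List Int) (k : Nat) :
    pvStep x (pvTab (pvComb l) 0 (k + 1)) = pvTab (pvComb (x :: l)) 0 (k + 1) := by
  simp only [pvTab, pvStep]
  rw [pvPush_tab x (pvComb l) k 0 (pvComb l 0) rfl]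
  congr 1
  · cases l <;> rfl
  · have : ∀ m j, pvTab (fun i => (pvComb l (i - 1)).map (fun c => x :: c) ++ pvComb l i) (j + 1) m
        = pvTab (pvComb (x :: l)) (j + 1) m := by
      intro m
      induction m with
      | zero => intro j; rfl
      | succ m ih =>
        intro j
        simp only [pvTab]
        congr 1
        exact ih (j + 1)
    exact this k 0

theorem pvTab_nil_eq (k j : Nat) : pvTab (pvComb []) (j + 1) k = List.replicate k [] := by
  induction k generalizing j with
  | zero => rfl
  | succ k ih =>
    simp only [pvTab]
    rw [ih (j + 1)]
    rfl

theorem foldr_step_tab (l : List Int) (k : Nat) :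
    l.foldr pvStep ([[[]]] ++ List.replicate k []) = pvTab (pvComb l) 0 (k + 1) := by
  have hinit : ([[[]]] ++ List.replicate k [] : List (List (List Int))) = pvTab (pvComb []) 0 (k + 1) := by
    simp only [pvTab]
    rw [pvTab_nil_eq k 0]
    rfl
  rw [hinit]
  induction l with
  | nil => rfl
  | cons x xs ih =>
    simp only [List.foldr]
    rw [ih, pvStep_tab]

theorem pvTab_getD (g : Nat → List (List Int)) :
    ∀ (m j i : Nat), i < m → (pvTab g j m).getD i [] = g (j + i) := by
  intro m
  induction m with
  | zero => intro j i h; omega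
  | succ m ih =>
    intro j i h
    cases i with
    | zero => rfl
    | succ i =>
      simp only [pvTab, List.getD_cons_succ]
      rw [ih (j + 1) i (by omega)]
      congr 1
      omega

theorem subset_n_alt_eq_comb (l : List Int) (n : Int) (prefix_ : List Int) :
    subset_n_alt l n prefix_ =
      (pvComb l (min n (l.length : Int)).toNat).map
        (fun c => PySem.List.sorted (prefix_ ++ c) (fun c => c) false) := by
  unfold subset_n_alt
  dsimp only
  rw [foldr_step_tab l (min n (l.length : Int)).toNat]
  rw [pvTab_getD (pvComb l) ((min n (l.length : Int)).toNat + 1) 0 (min n (l.length : Int)).toNat (by omega)]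
  simp

-- ===== VERDICT (by name: the statement is the Claim_ definition above) =====
theorem subset_n_spec : Claim_equal_subset_n := by
  intro l n prefix_ _ hpre
  unfold Spec_subset_n
  rw [subset_n_eq_comb l n prefix_ hpre, subset_n_alt_eq_comb l n prefix_]
  have : min n.toNat l.length = (min n (l.length : Int)).toNat := by omega
  rw [this]
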